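-- pv_equiv track=rewrite | github.com/forbiddenPHP/JoPhi-AI-generate | app.py | _is_rvc_repo
-- ===== SOURCE A (Python) =====
-- def _is_rvc_repo(files: list[str]) -> bool:
--     """Check if a repo looks like an RVC voice model (not an LLM)."""
--     basenames = {f.split("/")[-1] for f in files}
--
--     pth = [f for f in files if f.endswith(".pth")]
--     if not pth:
--         return False
--
--     llm_indicators = {
--         "tokenizer.json", "tokenizer_config.json", "vocab.txt",
--         "merges.txt", "sentencepiece.bpe.model", "special_tokens_map.json",
--         "generation_config.json", "vocab.json",
--     }
--     if llm_indicators & basenames: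
--         return False
--
--     if any(f.endswith(".safetensors") for f in files):
--         return False
--
--     voice_pth = [f for f in pth if not any(
--         f.split("/")[-1].startswith(p) for p in ("D_", "G_", "D-", "G-", "f0")
--     )]
--     if not voice_pth and len(pth) != 1:
--         return False
--
--     return True
-- ===== SOURCE B (Python) =====
-- _LLM_INDICATORS = {
--     "tokenizer.json", "tokenizer_config.json", "vocab.txt",
--     "merges.txt", "sentencepiece.bpe.model", "special_tokens_map.json",
--     "generation_config.json", "vocab.json",
-- }
-- _NON_VOICE_PREFIXES = ("D_", "G_", "D-", "G-", "f0")
--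
-- # Category codes: 0 = LLM indicator, 1 = safetensors, 2 = voice .pth,
-- # 3 = non-voice .pth, 4 = irrelevant.
-- def _classify(f: str) -> int:
--     base = f.split("/")[-1]
--     if base in _LLM_INDICATORS:
--         return 0
--     if f.endswith(".safetensors"):
--         return 1
--     if f.endswith(".pth"):
--         return 3 if base.startswith(_NON_VOICE_PREFIXES) else 2
--     return 4
--
--
-- def _is_rvc_repo(files: list[str]) -> bool:
--     """Check if a repo looks like an RVC voice model (not an LLM).
--
--     Classify each file into one category, abort as soon as a disqualifying
--     category is seen, and keep only a saturating .pth counter (capped at 2)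
--     plus a voice flag.
--     """
--     pth = 0  # saturates at 2: only "zero / exactly one / more" matters
--     voice = False
--     for f in files:
--         tag = _classify(f)
--         if tag <= 1:
--             return False  # LLM indicator or safetensors: disqualified
--         if tag == 2:
--             voice = True
--             pth = min(pth + 1, 2)
--         elif tag == 3:
--             pth = min(pth + 1, 2)
--     return pth > 0 and (voice or pth == 1)
-- ===== Notes on version B (the rewrite author's own statement) =====
-- stated objective: alternative
-- what changed: Instead of A's four staged whole-list scans (pth filter, basename-set intersection, safetensors any-scan, voice-pth filter), B classifies each file into one of five disjoint categories and makes a single short-circuiting pass that aborts on the first disqualifying file, keeping only a saturating pth counter (capped at 2) and a voice flag instead of building filtered lists.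
import Mathlib
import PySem

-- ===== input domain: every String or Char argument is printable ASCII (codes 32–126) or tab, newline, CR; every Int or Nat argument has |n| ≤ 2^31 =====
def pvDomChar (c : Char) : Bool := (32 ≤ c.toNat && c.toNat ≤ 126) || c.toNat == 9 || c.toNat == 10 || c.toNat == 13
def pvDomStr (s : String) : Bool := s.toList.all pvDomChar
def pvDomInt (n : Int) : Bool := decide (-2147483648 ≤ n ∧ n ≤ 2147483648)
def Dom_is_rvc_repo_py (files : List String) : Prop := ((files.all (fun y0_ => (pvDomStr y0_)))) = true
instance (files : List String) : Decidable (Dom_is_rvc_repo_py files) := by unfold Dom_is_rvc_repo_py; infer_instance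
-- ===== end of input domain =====

-- B replaces A's four staged whole-list scans with a per-file classifier into five
-- disjoint categories and one short-circuiting pass keeping a saturating pth counter
-- and a voice flag (objective: alternative).

-- shared literal constants of both programs
def pvLlmIndicators : PySem.Set String := PySem.Set.ofList
  ["tokenizer.json", "tokenizer_config.json", "vocab.txt",
   "merges.txt", "sentencepiece.bpe.model", "special_tokens_map.json",
   "generation_config.json", "vocab.json"]

def pvPrefixes : List String := ["D_", "G_", "D-", "G-", "f0"]

-- f.split("/")[-1]; split with a nonempty separator never returns an empty list,
-- so the -1 index always hits and both `getD` defaults are unreachable (exact on Dom)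
def pvBasename (f : String) : String :=
  (PySem.List.pyGet? ((PySem.Str.split? f "/").getD []) (-1)).getD ""

-- ===== PORT A =====
def is_rvc_repo_py (files : List String) : Bool :=
  let basenames : PySem.Set String := PySem.Set.ofList (files.map pvBasename)
  let pth := files.filter (fun f => PySem.Str.endswith f ".pth")
  if pth.isEmpty then false
  else if !(PySem.Set.inter pvLlmIndicators basenames).isEmpty then false
  else if files.any (fun f => PySem.Str.endswith f ".safetensors") then false
  else
    let voice_pth := pth.filter (fun f =>
      !(pvPrefixes.any (fun p => PySem.Str.startswith (pvBasename f) p)))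
    if voice_pth.isEmpty && !(pth.length == 1) then false
    else true

-- ===== PORT B =====
-- _classify: category codes 0 llm, 1 safetensors, 2 voice pth, 3 non-voice pth, 4 other
def pvClassify (f : String) : Int :=
  let base := pvBasename f
  if PySem.Set.contains pvLlmIndicators base then 0
  else if PySem.Str.endswith f ".safetensors" then 1
  else if PySem.Str.endswith f ".pth" then
    (if pvPrefixes.any (fun p => PySem.Str.startswith base p) then 3 else 2)
  else 4

-- the for-loop with its two early `return False` exits, as structural recursion
def pvGoB : List String → Int → Bool → Bool
  | [], pth, voice => decide (0 < pth) && (voice || decide (pth = 1))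
  | f :: rest, pth, voice =>
    let tag := pvClassify f
    if tag ≤ 1 then false
    else if tag = 2 then pvGoB rest (min (pth + 1) 2) true
    else if tag = 3 then pvGoB rest (min (pth + 1) 2) voice
    else pvGoB rest pth voice

def is_rvc_repo_py_alt (files : List String) : Bool :=
  pvGoB files 0 false

-- ===== PRECONDITION & SPEC =====
def Spec_is_rvc_repo_py (files : List String) (out : Bool) : Prop := out = is_rvc_repo_py_alt files
instance (files : List String) (out : Bool) : Decidable (Spec_is_rvc_repo_py files out) := by unfold Spec_is_rvc_repo_py; infer_instance

-- ===== CLAIM (what is proved, stated in full; the proofs are below) =====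
def Claim_equal_is_rvc_repo_py : Prop := ∀ (files : List String), Dom_is_rvc_repo_py files → Spec_is_rvc_repo_py files (is_rvc_repo_py files)

-- ===== LEMMAS AND PROOFS =====

-- the four atomic tests of both programs, and B's classifier categories as predicates
def pvIsPth (f : String) : Bool := PySem.Str.endswith f ".pth"
def pvIsVoice (f : String) : Bool :=
  !(pvPrefixes.any (fun p => PySem.Str.startswith (pvBasename f) p))
def pvIsST (f : String) : Bool := PySem.Str.endswith f ".safetensors"
def pvIsLlm (f : String) : Bool := PySem.Set.contains pvLlmIndicators (pvBasename f)
def pvDisq (f : String) : Bool := pvIsLlm f || pvIsST f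
def pvPthB (f : String) : Bool := !pvDisq f && pvIsPth f
def pvVoiceB (f : String) : Bool := !pvDisq f && pvIsPth f && pvIsVoice f

-- closed form of B's loop, from any saturated starting state
lemma pvGoB_spec (files : List String) (pth : Int) (voice : Bool)
    (h0 : 0 ≤ pth) (h2 : pth ≤ 2) :
    pvGoB files pth voice =
      (!(files.any pvDisq) &&
       (decide (0 < min (pth + (files.countP pvPthB : Int)) 2) &&
        ((voice || files.any pvVoiceB) ||
         decide (min (pth + (files.countP pvPthB : Int)) 2 = 1)))) := by
  induction files generalizing pth voice with
  | nil =>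
    simp only [pvGoB, List.any_nil, List.countP_nil, Nat.cast_zero, add_zero,
      Bool.not_false, Bool.true_and, Bool.or_false]
    rw [min_eq_left h2]
  | cons f fs ih =>
    have hcnt : (0:Int) ≤ (fs.countP pvPthB : Int) := by positivity
    simp only [List.any_cons, List.countP_cons, pvGoB]
    by_cases hL : pvIsLlm f = true
    · have hc : pvClassify f = 0 := by
        simp only [pvIsLlm] at hL; simp only [pvClassify, hL, if_true]
      have hd : pvDisq f = true := by simp [pvDisq, hL]
      simp [hc, hd]
    · simp only [Bool.not_eq_true] at hL
      by_cases hS : pvIsST f = true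
      · have hc : pvClassify f = 1 := by
          simp only [pvIsLlm] at hL; simp only [pvIsST] at hS
          simp only [pvClassify, hL, hS]; norm_num
        have hd : pvDisq f = true := by simp [pvDisq, hS]
        simp [hc, hd]
      · simp only [Bool.not_eq_true] at hS
        have hd : pvDisq f = false := by simp [pvDisq, hL, hS]
        by_cases hP : pvIsPth f = true
        · by_cases hV : pvIsVoice f = true
          · have hV' : (pvPrefixes.any (fun p => PySem.Str.startswith (pvBasename f) p)) = false := by
              simpa [pvIsVoice] using hV
            have hc : pvClassify f = 2 := by
              simp only [pvIsLlm] at hL; simp only [pvIsST] at hS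
              simp only [pvIsPth] at hP
              simp only [pvClassify, hL, hS, hP, hV']; simp
            have hb : pvPthB f = true := by simp [pvPthB, hd, hP]
            have hv : pvVoiceB f = true := by simp [pvVoiceB, hd, hP, hV]
            rw [if_neg (by omega), if_pos (by rw [hc]), ih _ _ (by omega) (by omega)]
            have key : min (min (pth + 1) 2 + (fs.countP pvPthB : Int)) 2
                = min (pth + ((fs.countP pvPthB : Int) + 1)) 2 := by omega
            simp [hb, hv, hd, key]
          · simp only [Bool.not_eq_true] at hV
            have hV' : (pvPrefixes.any (fun p => PySem.Str.startswith (pvBasename f) p)) = true := by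
              simpa [pvIsVoice] using hV
            have hc : pvClassify f = 3 := by
              simp only [pvIsLlm] at hL; simp only [pvIsST] at hS
              simp only [pvIsPth] at hP
              simp only [pvClassify, hL, hS, hP, hV']; simp
            have hb : pvPthB f = true := by simp [pvPthB, hd, hP]
            have hv : pvVoiceB f = false := by simp [pvVoiceB, hd, hP, hV]
            rw [if_neg (by omega), if_neg (by rw [hc]; norm_num), if_pos (by rw [hc]),
              ih _ _ (by omega) (by omega)]
            have key : min (min (pth + 1) 2 + (fs.countP pvPthB : Int)) 2
                = min (pth + ((fs.countP pvPthB : Int) + 1)) 2 := by omega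
            simp [hb, hv, hd, key]
        · simp only [Bool.not_eq_true] at hP
          have hc : pvClassify f = 4 := by
            simp only [pvIsLlm] at hL; simp only [pvIsST] at hS
            simp only [pvIsPth] at hP
            simp only [pvClassify, hL, hS, hP]; simp
          have hb : pvPthB f = false := by simp [pvPthB, hP]
          have hv : pvVoiceB f = false := by simp [pvVoiceB, hP]
          rw [if_neg (by omega), if_neg (by rw [hc]; norm_num), if_neg (by rw [hc]; norm_num),
            ih _ _ h0 h2]
          simp [hb, hv, hd]

-- A's intersection test equals "some file has an LLM-indicator basename"
lemma pvInterEmpty (files : List String) :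
    (PySem.Set.inter pvLlmIndicators (PySem.Set.ofList (files.map pvBasename))).isEmpty
      = !(files.any pvIsLlm) := by
  rcases h : files.any pvIsLlm with _ | _
  · simp only [Bool.not_false]
    rw [List.isEmpty_iff, List.eq_nil_iff_forall_not_mem]
    intro y hy
    rw [PySem.Set.mem_inter] at hy
    rcases hy with ⟨hy1, hy2⟩
    rw [PySem.Set.mem_ofList _ _, List.mem_map] at hy2
    rcases hy2 with ⟨f, hf, rfl⟩
    have := List.any_eq_false.mp (by simpa using h) f hf
    simp only [pvIsLlm] at this
    exact this ((PySem.Set.contains_iff _ _).mpr hy1)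
  · simp only [Bool.not_true]
    rw [List.any_eq_true] at h
    rcases h with ⟨f, hf, hc⟩
    simp only [pvIsLlm] at hc
    have hmem : pvBasename f ∈ PySem.Set.inter pvLlmIndicators
        (PySem.Set.ofList (files.map pvBasename)) := by
      rw [PySem.Set.mem_inter]
      exact ⟨(PySem.Set.contains_iff _ _).mp hc,
        (PySem.Set.mem_ofList _ _).mpr (List.mem_map_of_mem hf)⟩
    rcases hl : (PySem.Set.inter pvLlmIndicators
        (PySem.Set.ofList (files.map pvBasename))) with _ | _
    · rw [hl] at hmem; simp at hmem
    · simp [List.isEmpty]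

-- ===== VERDICT (by name: the statement is the Claim_ definition above) =====
theorem is_rvc_repo_py_spec : Claim_equal_is_rvc_repo_py := by
  intro files _
  unfold Spec_is_rvc_repo_py is_rvc_repo_py is_rvc_repo_py_alt
  rw [pvGoB_spec files 0 false le_rfl (by norm_num)]
  simp only [pvInterEmpty, zero_add]
  by_cases hD : files.any pvDisq = true
  · -- a disqualifying file exists: both sides are false
    rw [hD]
    simp only [Bool.not_true, Bool.false_and]
    rw [List.any_eq_true] at hD
    rcases hD with ⟨f, hf, hdf⟩
    simp only [pvDisq, Bool.or_eq_true] at hdf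
    rcases hdf with hL | hS
    · have hLany : files.any pvIsLlm = true := List.any_eq_true.mpr ⟨f, hf, hL⟩
      rw [hLany]
      by_cases he : (files.filter (fun f => PySem.Str.endswith f ".pth")).isEmpty <;> simp
    · have hSany : files.any (fun f => PySem.Str.endswith f ".safetensors") = true :=
        List.any_eq_true.mpr ⟨f, hf, hS⟩
      rw [hSany]
      by_cases he : (files.filter (fun f => PySem.Str.endswith f ".pth")).isEmpty <;>
        by_cases hl : files.any pvIsLlm <;> simp [hl]
  · -- no disqualifier: the two final formulas coincide
    rw [Bool.not_eq_true] at hD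
    have hmem : ∀ f ∈ files, pvDisq f = false := fun f hf => by
      simpa using List.any_eq_false.mp hD f hf
    have hLf : files.any pvIsLlm = false := by
      apply List.any_eq_false.mpr; intro f hf
      have := hmem f hf; simp only [pvDisq, Bool.or_eq_false_iff] at this
      simp [this.1]
    have hSf : files.any (fun f => PySem.Str.endswith f ".safetensors") = false := by
      apply List.any_eq_false.mpr; intro f hf
      have := hmem f hf; simp only [pvDisq, Bool.or_eq_false_iff] at this
      simp only [Bool.not_eq_true]; exact this.2
    have hcnt : files.countP pvPthB = files.countP pvIsPth :=
      List.countP_congr (fun f hf => by simp [pvPthB, hmem f hf])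
    have hvo : files.any pvVoiceB = files.any (fun f => pvIsPth f && pvIsVoice f) :=
      PySem.List.any_congr_mem (fun f hf => by simp [pvVoiceB, hmem f hf])
    have hlen : (files.filter (fun f => PySem.Str.endswith f ".pth")).length
        = files.countP pvIsPth := by rw [List.countP_eq_length_filter]; rfl
    have hemp : (files.filter (fun f => PySem.Str.endswith f ".pth")).isEmpty
        = decide (files.countP pvIsPth = 0) := by
      rw [← hlen]
      rcases files.filter (fun f => PySem.Str.endswith f ".pth") with _ | ⟨a, l⟩ <;> simp
    have hvoice : (files.filter (fun f => PySem.Str.endswith f ".pth")).filter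
          (fun f => !(pvPrefixes.any (fun p => PySem.Str.startswith (pvBasename f) p)))
        = files.filter (fun f => pvIsPth f && pvIsVoice f) := by
      rw [List.filter_filter]
      exact List.filter_congr (fun a _ => by simp [pvIsPth, pvIsVoice, Bool.and_comm])
    have hvemp : (files.filter (fun f => pvIsPth f && pvIsVoice f)).isEmpty
        = !(files.any (fun f => pvIsPth f && pvIsVoice f)) := by
      rcases h : files.any (fun f => pvIsPth f && pvIsVoice f) with _ | _
      · simp only [Bool.not_false, List.isEmpty_iff, List.filter_eq_nil_iff]
        exact fun f hf => by simpa using (List.any_eq_false).mp h f hf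
      · rw [List.any_eq_true] at h
        rcases h with ⟨f, hf, hc⟩
        have hmem2 : f ∈ files.filter (fun f => pvIsPth f && pvIsVoice f) :=
          List.mem_filter.mpr ⟨hf, hc⟩
        rcases hl2 : files.filter (fun f => pvIsPth f && pvIsVoice f) with _ | ⟨a, l⟩
        · rw [hl2] at hmem2; simp at hmem2
        · simp
    rw [hD, hLf, hSf, hcnt, hvo]
    simp only [hemp, hvoice, hvemp, hlen, Bool.not_false, Bool.true_and, Bool.false_or]
    set n := files.countP pvIsPth with hn
    rcases hV : files.any (fun f => pvIsPth f && pvIsVoice f) with _ | _ <;>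
      by_cases h0 : n = 0 <;> by_cases h1 : n = 1 <;>
        simp [hV, h0, h1] <;> omega
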